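-- pv_equiv track=rewrite | github.com/anabrunner/Elemental-Data-Analyzer | Elemental_data_analyzer.py | sort_samples
-- ===== SOURCE A (Python) =====
-- def sort_samples(samples_list):
--     standards = ["Blank", "Standard 1", "Standard 2", "Standard 3", "Continuing Calibration Blank", "Continuing Calibration Verification"]
--     aquarium_samples_list = []
--     river_samples_list = []
--     lake_samples_list = []
--     other_samples_list = []
--     for sample in samples_list:
--         if sample in standards:
--             pass
--         elif sample[0].upper() == "A":
--             aquarium_samples_list.append(sample)
--         elif sample[0].upper() == "R":
--             river_samples_list.append(sample)
--         elif sample[0].upper() == "L":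
--             lake_samples_list.append(sample)
--         else:
--             other_samples_list.append(sample)
--     return aquarium_samples_list, river_samples_list, lake_samples_list, other_samples_list
-- ===== SOURCE B (Python) =====
-- def sort_samples(samples_list):
--     standards = {"Blank", "Standard 1", "Standard 2", "Standard 3",
--                  "Continuing Calibration Blank", "Continuing Calibration Verification"}
--     kept = [s for s in samples_list if s not in standards]
--     aquarium = [s for s in kept if s[0].upper() == "A"]
--     river = [s for s in kept if s[0].upper() == "R"]
--     lake = [s for s in kept if s[0].upper() == "L"]
--     other = [s for s in kept if s[0].upper() not in ("A", "R", "L")]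
--     return aquarium, river, lake, other
-- ===== Notes on version B (the rewrite author's own statement) =====
-- stated objective: alternative
-- what changed: Replaces the single if/elif loop with four accumulators by a standards-exclusion pass followed by four independent filtering comprehensions, one per output list.
import Mathlib
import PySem

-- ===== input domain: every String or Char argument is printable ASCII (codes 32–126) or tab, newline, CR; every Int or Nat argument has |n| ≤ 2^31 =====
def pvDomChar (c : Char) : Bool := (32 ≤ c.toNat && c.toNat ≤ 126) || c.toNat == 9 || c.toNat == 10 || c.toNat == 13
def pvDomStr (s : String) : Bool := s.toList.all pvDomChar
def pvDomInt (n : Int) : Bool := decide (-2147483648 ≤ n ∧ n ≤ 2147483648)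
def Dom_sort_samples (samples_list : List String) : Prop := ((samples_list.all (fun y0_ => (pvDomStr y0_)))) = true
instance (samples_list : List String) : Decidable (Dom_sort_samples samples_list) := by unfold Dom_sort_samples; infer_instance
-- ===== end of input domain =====

-- B replaces A's single if/elif loop with a standards-exclusion pass followed by four
-- independent filtering passes, one per output list (alternative decomposition, same cost).

-- shared helpers: both Pythons test membership in the same standards list and
-- both compute sample[0].upper() (exact on the ASCII domain; both raise on "")
def pvStandards : List String :=
  ["Blank", "Standard 1", "Standard 2", "Standard 3",
   "Continuing Calibration Blank", "Continuing Calibration Verification"]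

-- sample[0].upper(): first char, uppercased; the ' ' default is unreachable under Pre_
def pvFirstUpper (s : String) : Char :=
  PySem.Chars.upperChar ((PySem.Str.pyGet? s 0).getD ' ')

-- ===== PORT A =====
def pvStepA (acc : List String × List String × List String × List String) (sample : String) :
    List String × List String × List String × List String :=
  let (a, r, l, o) := acc
  if sample ∈ pvStandards then acc
  else if pvFirstUpper sample = 'A' then (a ++ [sample], r, l, o)
  else if pvFirstUpper sample = 'R' then (a, r ++ [sample], l, o)
  else if pvFirstUpper sample = 'L' then (a, r, l ++ [sample], o)
  else (a, r, l, o ++ [sample])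

def sort_samples (samples_list : List String) :
    List String × List String × List String × List String :=
  samples_list.foldl pvStepA ([], [], [], [])

-- ===== PORT B =====
def sort_samples_alt (samples_list : List String) :
    List String × List String × List String × List String :=
  let kept := samples_list.filter (fun s => !(decide (s ∈ pvStandards)))
  (kept.filter (fun s => pvFirstUpper s = 'A'),
   kept.filter (fun s => pvFirstUpper s = 'R'),
   kept.filter (fun s => pvFirstUpper s = 'L'),
   kept.filter (fun s => pvFirstUpper s ≠ 'A' ∧ pvFirstUpper s ≠ 'R' ∧ pvFirstUpper s ≠ 'L'))

-- ===== PRECONDITION & SPEC =====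
-- Pre_ excludes lists containing the empty string, on which both Pythons raise IndexError at sample[0]
def Pre_sort_samples (samples_list : List String) : Prop := ¬ ("" ∈ samples_list)
instance (samples_list : List String) : Decidable (Pre_sort_samples samples_list) := by
  unfold Pre_sort_samples; infer_instance

def pvWitness_sort_samples : List String := ["Blank", "aqua", "River 2", "x1"]

def Spec_sort_samples (samples_list : List String)
    (out : List String × List String × List String × List String) : Prop :=
  out = sort_samples_alt samples_list
instance (samples_list : List String) (out : List String × List String × List String × List String) :
    Decidable (Spec_sort_samples samples_list out) := by unfold Spec_sort_samples; infer_instance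

-- ===== CLAIM (what is proved, stated in full; the proofs are below) =====
def Claim_equal_sort_samples : Prop :=
  ∀ (samples_list : List String), Dom_sort_samples samples_list →
    Pre_sort_samples samples_list →
    Spec_sort_samples samples_list (sort_samples samples_list)

-- ===== LEMMAS AND PROOFS =====
theorem sort_samples_loop (l : List String) (a r lk o : List String) :
    l.foldl pvStepA (a, r, lk, o) =
      (a ++ (sort_samples_alt l).1, r ++ (sort_samples_alt l).2.1,
       lk ++ (sort_samples_alt l).2.2.1, o ++ (sort_samples_alt l).2.2.2) := by
  induction l generalizing a r lk o with
  | nil => simp [sort_samples_alt]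
  | cons s t ih =>
    by_cases hs : s ∈ pvStandards
    · simp [sort_samples_alt, hs, List.foldl_cons, pvStepA, ih]
    · by_cases hA : pvFirstUpper s = 'A'
      · simp [sort_samples_alt, hs, hA, List.foldl_cons, pvStepA, ih]
      · by_cases hR : pvFirstUpper s = 'R'
        · simp [sort_samples_alt, hs, hR, List.foldl_cons, pvStepA, ih]
        · by_cases hL : pvFirstUpper s = 'L'
          · simp [sort_samples_alt, hs, hL, List.foldl_cons, pvStepA, ih]
          · simp [sort_samples_alt, hs, hA, hR, hL, List.foldl_cons, pvStepA, ih]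

-- ===== VERDICT (by name: the statement is the Claim_ definition above) =====
theorem sort_samples_spec : Claim_equal_sort_samples := by
  intro l _ _
  unfold Spec_sort_samples sort_samples
  rw [sort_samples_loop]
  simp
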